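-- pv_equiv track=rewrite | github.com/activeloopai/deeplake | deeplake/core/vectorstore/vector_search/utils.py | check_length_of_each_tensor
-- ===== SOURCE A (Python) =====
-- def check_length_of_each_tensor(tensors):
--     first_item = next(iter(tensors))
--     tensor_length = len(tensors[first_item])
--
--     for tensor_name in tensors:
--         if len(tensors[f"{tensor_name}"]) != tensor_length:
--             tensor_lengths = create_tensor_to_length_str(tensors)
--
--             raise Exception(
--                 f"All of the tensors should have equal length. Currently tensors have different length: {tensor_lengths}"
--             )
--
--     return tensor_length
--
-- def create_tensor_to_length_str(tensors):
--     tensor_lengths = "\n"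
--     for tensor_name in tensors:
--         tensor_lengths += (
--             f"length of {tensor_name} = {len(tensors[f'{tensor_name}'])}\n"
--         )
--     return tensor_lengths
-- ===== SOURCE B (Python) =====
-- def check_length_of_each_tensor(tensors):
--     first_item = next(iter(tensors))
--     lens = [len(tensors[name]) for name in tensors]
--     if min(lens) != max(lens):
--         tensor_lengths = create_tensor_to_length_str(tensors)
--         raise Exception(
--             f"All of the tensors should have equal length. Currently tensors have different length: {tensor_lengths}"
--         )
--     return lens[0]
--
--
-- def create_tensor_to_length_str(tensors):
--     return "\n" + "".join(
--         f"length of {name} = {len(tensors[name])}\n" for name in tensors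
--     )
-- ===== Notes on version B (the rewrite author's own statement) =====
-- stated objective: alternative
-- what changed: Replaces A's compare-each-length-to-the-first-reference scan with an early-exit raise inside the loop by a staged computation: collect all lengths into a list, decide equality by comparing min(lens) with max(lens), and return the first collected length; the error message is built by a join instead of string accumulation.
import Mathlib
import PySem

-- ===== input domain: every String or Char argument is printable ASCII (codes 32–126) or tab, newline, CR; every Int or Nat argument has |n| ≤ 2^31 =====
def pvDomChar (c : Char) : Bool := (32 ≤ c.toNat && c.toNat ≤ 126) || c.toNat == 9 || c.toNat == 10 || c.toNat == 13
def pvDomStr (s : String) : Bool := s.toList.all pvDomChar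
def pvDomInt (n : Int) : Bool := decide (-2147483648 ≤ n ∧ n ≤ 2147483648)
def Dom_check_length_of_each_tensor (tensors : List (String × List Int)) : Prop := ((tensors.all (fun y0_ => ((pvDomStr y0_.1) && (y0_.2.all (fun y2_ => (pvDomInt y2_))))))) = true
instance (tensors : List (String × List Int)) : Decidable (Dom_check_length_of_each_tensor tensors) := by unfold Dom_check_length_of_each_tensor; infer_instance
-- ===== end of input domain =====

-- B replaces A's compare-each-length-to-the-reference scan (early-exit raise) by a
-- staged computation: collect all lengths, then test min(lens) == max(lens)
-- (objective: alternative). Both raise on empty input and on unequal lengths;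
-- those inputs are outside Pre_.

-- ===== PORT A =====
-- A: take the first key, look up its length, then scan all keys comparing each
-- looked-up length to the reference; a mismatch raises (here: 0, excluded by Pre_).
def check_length_of_each_tensor (tensors : List (String × List Int)) : Int :=
  match tensors with
  | [] => 0  -- next(iter(tensors)) raises StopIteration; excluded by Pre_
  | (first_item, _) :: _ =>
    let d := PySem.Dict.mk tensors
    let tensor_length : Int := (d.getD first_item []).length
    if tensors.any (fun p => ((d.getD p.1 []).length : Int) ≠ tensor_length) then
      0  -- raise Exception(...); excluded by Pre_
    else
      tensor_length

-- ===== PORT B =====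
-- B: collect the list of all lengths, compare its minimum with its maximum
-- (unequal means a raise), and return the first collected length.
def check_length_of_each_tensor_alt (tensors : List (String × List Int)) : Int :=
  if tensors.isEmpty then
    0  -- next(iter(tensors)) raises StopIteration; excluded by Pre_
  else
    let lens : List Int :=
      tensors.map (fun p => (((PySem.Dict.mk tensors).getD p.1 []).length : Int))
    match PySem.List.min? lens (fun x => x), PySem.List.max? lens (fun x => x) with
    | some mn, some mx =>
      if mn ≠ mx then
        0  -- raise Exception(...); excluded by Pre_
      else
        lens.headD 0  -- lens[0]; lens is nonempty here
    | _, _ => 0  -- unreachable: lens is nonempty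

-- ===== PRECONDITION & SPEC =====
-- Pre_ excludes exactly the inputs where A raises: the empty dict (StopIteration)
-- and dicts whose looked-up tensor lengths are not all equal (Exception).
def Pre_check_length_of_each_tensor (tensors : List (String × List Int)) : Prop :=
  match tensors with
  | [] => False
  | (first_item, _) :: _ =>
    ∀ p ∈ tensors,
      ((PySem.Dict.mk tensors).getD p.1 ([] : List Int)).length
        = ((PySem.Dict.mk tensors).getD first_item ([] : List Int)).length

instance (tensors : List (String × List Int)) : Decidable (Pre_check_length_of_each_tensor tensors) := by
  unfold Pre_check_length_of_each_tensor; cases tensors <;> infer_instance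

def pvWitness_check_length_of_each_tensor : (List (String × List Int)) :=
  [("x", [1, 2]), ("y", [3, 4])]

def Spec_check_length_of_each_tensor (tensors : List (String × List Int)) (out : Int) : Prop := out = check_length_of_each_tensor_alt tensors
instance (tensors : List (String × List Int)) (out : Int) : Decidable (Spec_check_length_of_each_tensor tensors out) := by unfold Spec_check_length_of_each_tensor; infer_instance

-- ===== CLAIM (what is proved, stated in full; the proofs are below) =====
def Claim_equal_check_length_of_each_tensor : Prop := ∀ (tensors : List (String × List Int)), Dom_check_length_of_each_tensor tensors → Pre_check_length_of_each_tensor tensors → Spec_check_length_of_each_tensor tensors (check_length_of_each_tensor tensors)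

-- ===== LEMMAS AND PROOFS =====

-- ===== VERDICT (by name: the statement is the Claim_ definition above) =====
theorem check_length_of_each_tensor_spec : Claim_equal_check_length_of_each_tensor := by
  intro tensors _ hpre
  unfold Spec_check_length_of_each_tensor
  match tensors, hpre with
  | (first_item, v) :: rest, hpre =>
    unfold check_length_of_each_tensor check_length_of_each_tensor_alt
    simp only [List.isEmpty_cons, if_neg Bool.false_ne_true]
    set ts := (first_item, v) :: rest with hts
    set d := PySem.Dict.mk ts with hd
    set tl : Int := ((d.getD first_item []).length : Int) with htl
    have hall : ∀ p ∈ ts, ((d.getD p.1 ([] : List Int)).length : Int) = tl := by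
      intro p hp
      have := hpre p hp
      simp only [htl, hd]
      exact_mod_cast this
    have hany : ts.any (fun p => ((d.getD p.1 []).length : Int) ≠ tl) = false := by
      simp only [List.any_eq_false]
      intro p hp
      simp [hall p hp]
    have hmem : ∀ x ∈ ts.map (fun p => ((d.getD p.1 []).length : Int)), x = tl := by
      intro x hx
      rcases List.mem_map.mp hx with ⟨p, hp, hpx⟩
      rw [← hpx]; exact hall p hp
    have hne : ts.map (fun p => ((d.getD p.1 []).length : Int)) ≠ [] := by
      simp [hts]
    obtain ⟨mn, hmn⟩ :
        ∃ mn, PySem.List.min? (ts.map (fun p => ((d.getD p.1 []).length : Int))) (fun x => x) = some mn := by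
      cases hc : PySem.List.min? (ts.map (fun p => ((d.getD p.1 []).length : Int))) (fun x => x) with
      | none => exact absurd ((PySem.List.min?_eq_none_iff _ _).mp hc) hne
      | some m => exact ⟨m, rfl⟩
    obtain ⟨mx, hmx⟩ :
        ∃ mx, PySem.List.max? (ts.map (fun p => ((d.getD p.1 []).length : Int))) (fun x => x) = some mx := by
      cases hc : PySem.List.max? (ts.map (fun p => ((d.getD p.1 []).length : Int))) (fun x => x) with
      | none => exact absurd ((PySem.List.max?_eq_none_iff _ _).mp hc) hne
      | some m => exact ⟨m, rfl⟩
    have hmn' : mn = tl := hmem mn (PySem.List.min?_mem hmn)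
    have hmx' : mx = tl := hmem mx (PySem.List.max?_mem hmx)
    have hhead : (ts.map (fun p => ((d.getD p.1 []).length : Int))).headD 0 = tl := by
      apply hmem
      cases hts' : ts.map (fun p => ((d.getD p.1 []).length : Int)) with
      | nil => exact absurd hts' hne
      | cons a l => simp
    rw [hany, hmn, hmx, hmn', hmx']
    simp only [Bool.false_eq_true, if_false, ne_eq, not_true_eq_false]
    exact hhead.symm
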